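-- pv_equiv track=rewrite | github.com/gjoireh/cote-practice | 프로그래머스/LV0/코딩테스트 입문/저주의 숫자 3/저주의 숫자 3.py | solution
-- ===== SOURCE A (Python) =====
-- def solution(n):
--     ans = 0
--     while n:
--         ans += 1
--         while ans % 3 == 0 or '3' in str(ans):
--             ans += 1
--         n -= 1
--     return ans
-- ===== SOURCE B (Python) =====
-- def solution(n):
--     # Closed form, O(log n): every "decade" 10*q..10*q+9 whose prefix q is 3-free
--     # contains exactly 6 valid numbers (not divisible by 3, no digit 3), and the
--     # 3-free prefixes in increasing order are exactly the base-9 numbers with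
--     # digits remapped 0,1,2,3,...,8 -> 0,1,2,4,...,9.
--     if n <= 0:
--         return 0
--     a, b = divmod(n - 1, 6)
--     # q = a-th 3-free number (a written in base 9, digits >= 3 shifted up by 1)
--     q, w = 0, 1
--     while a:
--         a, d = divmod(a, 9)
--         q += w * (d if d < 3 else d + 1)
--         w *= 10
--     r = q % 3
--     if r == 0:
--         ds = [1, 2, 4, 5, 7, 8]
--     elif r == 1:
--         ds = [0, 1, 4, 6, 7, 9]
--     else:
--         ds = [0, 2, 5, 6, 8, 9]
--     return 10 * q + ds[b]
-- ===== Notes on version B (the rewrite author's own statement) =====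
-- stated objective: faster
-- what changed: Replaces A's linear scan over all integers (with a str-based digit test per candidate) by a closed form: the n-th valid number is computed directly from n via a base-9 digit remap that enumerates 3-free decade prefixes (each 3-free decade holds exactly 6 valid numbers), so B runs in O(log n) with no search at all.
import Mathlib
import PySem

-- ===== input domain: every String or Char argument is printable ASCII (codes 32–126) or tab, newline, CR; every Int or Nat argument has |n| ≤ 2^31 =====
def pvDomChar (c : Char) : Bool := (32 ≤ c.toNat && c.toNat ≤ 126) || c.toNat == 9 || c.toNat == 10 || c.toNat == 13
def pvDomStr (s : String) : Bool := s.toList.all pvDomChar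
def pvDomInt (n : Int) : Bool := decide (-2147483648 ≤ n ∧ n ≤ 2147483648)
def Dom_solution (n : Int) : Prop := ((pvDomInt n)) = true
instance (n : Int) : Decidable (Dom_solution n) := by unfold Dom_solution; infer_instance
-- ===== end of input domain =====

-- B replaces A's linear scan of all integers by a closed form (base-9 digit remap over
-- 3-free decades) computing the n-th valid number directly; objective: faster (asymptotic).


-- ===== PORT A =====
-- helpers for the termination of skipA (the port cites them by name below)

def badA (ans : Int) : Bool :=
  (PySem.Int.mod ans 3 == 0) || PySem.Str.isIn "3" (PySem.Int.toStr ans)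

lemma pv_singleton_infix_iff_mem (c : Char) (l : List Char) : [c] <:+: l ↔ c ∈ l := by
  constructor
  · intro h; exact h.subset (List.mem_singleton_self c)
  · intro h
    obtain ⟨s, t, rfl⟩ := List.append_of_mem h
    exact ⟨s, t, by simp⟩

lemma pv_toDigits_pow10 (m : Nat) : Nat.toDigits 10 (10 ^ m) = '1' :: List.replicate m '0' := by
  induction m with
  | zero => simp [Nat.toDigits_of_lt_base (by norm_num : (1:Nat) < 10)]; rfl
  | succ m ih =>
    have h10 : (10:Nat) ≤ 10 ^ (m+1) := by
      calc (10:Nat) = 10 ^ 1 := by norm_num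
      _ ≤ 10 ^ (m+1) := Nat.pow_le_pow_right (by norm_num) (by omega)
    rw [Nat.toDigits_of_base_le (by norm_num) h10]
    have h1 : 10 ^ (m+1) / 10 = 10 ^ m := by
      rw [pow_succ]; exact Nat.mul_div_cancel _ (by norm_num)
    have h2 : 10 ^ (m+1) % 10 = 0 := by
      rw [pow_succ]; exact Nat.mul_mod_left _ _
    rw [h1, h2, ih, List.replicate_succ']
    rfl

lemma pv_badA_pow10 (m : Nat) : badA ((10 ^ m : Nat) : Int) = false := by
  unfold badA
  have hmod : PySem.Int.mod ((10 ^ m : Nat) : Int) 3 = ((10 ^ m % 3 : Nat) : Int) := by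
    exact_mod_cast PySem.Int.mod_natCast (10 ^ m) 3
  have h3 : 10 ^ m % 3 = 1 := by
    rw [Nat.pow_mod]; norm_num
  have hIn : PySem.Str.isIn "3" (PySem.Int.toStr ((10 ^ m : Nat) : Int)) = false := by
    rw [Bool.eq_false_iff]
    intro h
    have hinf := (PySem.Str.isIn_iff_infix _ _).mp h
    have hs3 : ("3" : String).toList = ['3'] := rfl
    rw [hs3] at hinf
    have h3' := (pv_singleton_infix_iff_mem _ _).mp hinf
    rw [PySem.Int.toList_toStr] at h3'
    unfold PySem.Int.toChars at h3'
    rw [if_neg (not_lt.mpr (Int.natCast_nonneg _) : ¬ ((10 ^ m : Nat) : Int) < 0)] at h3'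
    rw [Int.toNat_natCast, pv_toDigits_pow10] at h3'
    simp [List.mem_replicate] at h3'
  rw [hmod, h3, hIn]
  simp

lemma pv_goodA_exists (a : Int) : ∃ k : Nat, badA (a + (k : Int)) = false := by
  have hlt : a ≤ ((10 ^ (a.toNat + 1) : Nat) : Int) := by
    have h1 : a.toNat < 10 ^ (a.toNat + 1) := by
      calc a.toNat < 10 ^ a.toNat := Nat.lt_pow_self (by norm_num)
      _ ≤ 10 ^ (a.toNat + 1) := Nat.pow_le_pow_right (by norm_num) (by omega)
    have h2 : a ≤ (a.toNat : Int) := Int.self_le_toNat a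
    omega
  refine ⟨(((10 ^ (a.toNat + 1) : Nat) : Int) - a).toNat, ?_⟩
  have : a + ((((10 ^ (a.toNat + 1) : Nat) : Int) - a).toNat : Int) = ((10 ^ (a.toNat + 1) : Nat) : Int) := by
    omega
  rw [this]
  exact pv_badA_pow10 _

lemma pv_skip_measure_lt (a : Int) (hbad : badA a = true) :
    Nat.find (pv_goodA_exists (a + 1)) < Nat.find (pv_goodA_exists a) := by
  have h0 : Nat.find (pv_goodA_exists a) ≠ 0 := by
    intro h
    have := Nat.find_spec (pv_goodA_exists a)
    rw [h] at this
    simp at this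
    rw [this] at hbad
    exact absurd hbad (by simp)
  have hle : Nat.find (pv_goodA_exists (a + 1)) ≤ Nat.find (pv_goodA_exists a) - 1 := by
    apply Nat.find_le
    have := Nat.find_spec (pv_goodA_exists a)
    have heq : a + 1 + ((Nat.find (pv_goodA_exists a) - 1 : Nat) : Int)
        = a + ((Nat.find (pv_goodA_exists a) : Nat) : Int) := by
      omega
    rw [heq]
    exact this
  omega

-- inner 'while ans % 3 == 0 or '3' in str(ans): ans += 1'
def skipA (ans : Int) : Int :=
  if h : badA ans then skipA (ans + 1) else ans
termination_by Nat.find (pv_goodA_exists ans)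
decreasing_by exact pv_skip_measure_lt ans h

-- outer 'while n:' loop; for n < 0 the Python loops forever (outside Pre_solution)
def loopA (n ans : Int) : Int :=
  if n ≤ 0 then ans else loopA (n - 1) (skipA (ans + 1))
termination_by n.toNat
decreasing_by omega

def solution (n : Int) : Int := loopA n 0

-- ===== PORT B =====
-- 'while a: a, d = divmod(a, 9); q += w * (d if d < 3 else d + 1); w *= 10'
def bloopB (a q w : Int) : Int :=
  if a ≤ 0 then q
  else bloopB (PySem.Int.floordiv a 9)
        (q + w * (if PySem.Int.mod a 9 < 3 then PySem.Int.mod a 9 else PySem.Int.mod a 9 + 1))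
        (w * 10)
termination_by a.toNat
decreasing_by
  rw [PySem.Int.floordiv_eq_ediv_of_pos (by norm_num)]
  omega

def solution_alt (n : Int) : Int :=
  if n ≤ 0 then 0
  else
    let a := PySem.Int.floordiv (n - 1) 6
    let b := PySem.Int.mod (n - 1) 6
    let q := bloopB a 0 1
    let r := PySem.Int.mod q 3
    let ds : List Int :=
      if r == 0 then [1, 2, 4, 5, 7, 8]
      else if r == 1 then [0, 1, 4, 6, 7, 9]
      else [0, 2, 5, 6, 8, 9]
    -- ds[b]: b = (n-1) % 6 ∈ [0, 6), always in range ('.getD 0' is only a totality guard)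
    10 * q + (PySem.List.pyGet? ds b).getD 0

-- ===== PRECONDITION & SPEC =====
-- Pre_ excludes n < 0, where the Python A loops forever ('while n:' with n decreasing from a negative value)
def Pre_solution (n : Int) : Prop := 0 ≤ n
instance (n : Int) : Decidable (Pre_solution n) := by unfold Pre_solution; infer_instance

def pvWitness_solution : Int := (5)

def Spec_solution (n : Int) (out : Int) : Prop := out = solution_alt n
instance (n : Int) (out : Int) : Decidable (Spec_solution n out) := by unfold Spec_solution; infer_instance

-- ===== CLAIM (what is proved, stated in full; the proofs are below) =====
def Claim_equal_solution : Prop := ∀ (n : Int), Dom_solution n → Pre_solution n → Spec_solution n (solution n)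

-- ===== LEMMAS AND PROOFS =====

-- 'm contains digit 3' on Nat
def has3 (m : Nat) : Bool :=
  if m = 0 then false else (m % 10 == 3) || has3 (m / 10)
termination_by m
decreasing_by omega

-- 'm is one of the counted numbers': not divisible by 3, no digit 3
def goodB (m : Nat) : Bool := !(m % 3 == 0) && !has3 m

lemma has3_pow10 (m : Nat) : has3 (10 ^ m) = false := by
  induction m with
  | zero => rw [has3]; simp; rw [has3]; simp
  | succ m ih =>
    rw [has3]
    have h1 : 10 ^ (m+1) / 10 = 10 ^ m := by rw [pow_succ]; exact Nat.mul_div_cancel _ (by norm_num)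
    have h2 : 10 ^ (m+1) % 10 = 0 := by rw [pow_succ]; exact Nat.mul_mod_left _ _
    rw [if_neg (by positivity), h1, h2, ih]
    rfl

lemma exFrom (m : Nat) : ∃ k : Nat, goodB (m + k) = true := by
  refine ⟨10 ^ (m + 1) - m, ?_⟩
  have hlt : m < 10 ^ (m + 1) := by
    calc m < 10 ^ m := Nat.lt_pow_self (by norm_num)
    _ ≤ 10 ^ (m + 1) := Nat.pow_le_pow_right (by norm_num) (by omega)
  have heq : m + (10 ^ (m + 1) - m) = 10 ^ (m + 1) := by omega
  rw [heq]
  unfold goodB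
  have h3 : 10 ^ (m + 1) % 3 = 1 := by rw [Nat.pow_mod]; norm_num
  rw [h3, has3_pow10]
  rfl

-- the smallest good number strictly above a
def nextV (a : Nat) : Nat := a + 1 + Nat.find (exFrom (a + 1))

-- the n-th good number (nthV 0 = 0)
def nthV : Nat → Nat
  | 0 => 0
  | n + 1 => nextV (nthV n)

lemma nextV_gt (a : Nat) : a < nextV a := by unfold nextV; omega

lemma nextV_good (a : Nat) : goodB (nextV a) = true := by
  have := Nat.find_spec (exFrom (a + 1))
  unfold nextV
  exact this


lemma nextV_eq (a b : Nat) (h1 : a < b) (h2 : goodB b = true)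
    (h3 : ∀ j, a < j → j < b → goodB j = false) : nextV a = b := by
  have hle : nextV a ≤ b := by
    unfold nextV
    have := Nat.find_min' (exFrom (a + 1)) (m := b - (a + 1)) (by
      have heq : a + 1 + (b - (a + 1)) = b := by omega
      rw [heq]; exact h2)
    omega
  rcases Nat.lt_or_ge (nextV a) b with h | h
  · have := h3 (nextV a) (nextV_gt a) h
    rw [nextV_good a] at this
    exact absurd this (by simp)
  · omega

lemma pv_digitChar_eq3 (e : Nat) (he : e < 10) : Nat.digitChar e = '3' ↔ e = 3 := by
  interval_cases e <;> simp [Nat.digitChar]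

lemma mem3_toDigits (m : Nat) : ('3' ∈ Nat.toDigits 10 m) ↔ (has3 m = true) := by
  induction m using Nat.strong_induction_on with
  | _ m ih =>
    rw [Nat.toDigits_eq_if (by norm_num)]
    by_cases h : m < 10
    · rw [if_pos h]
      interval_cases m <;> simp [has3, Nat.digitChar]
    · rw [if_neg h]
      have hm0 : m ≠ 0 := by omega
      rw [has3, if_neg hm0]
      have hdiv : m / 10 < m := by omega
      simp only [List.mem_append, List.mem_singleton, ih (m / 10) hdiv]
      rw [Bool.or_eq_true, beq_iff_eq, @eq_comm _ '3', pv_digitChar_eq3 (m % 10) (by omega)]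
      tauto

lemma badA_cast (m : Nat) : badA ((m : Nat) : Int) = !goodB m := by
  unfold badA goodB
  have hmod : PySem.Int.mod ((m : Nat) : Int) 3 = ((m % 3 : Nat) : Int) := by
    exact_mod_cast PySem.Int.mod_natCast m 3
  have hIn : PySem.Str.isIn "3" (PySem.Int.toStr ((m : Nat) : Int)) = has3 m := by
    rcases Bool.eq_false_or_eq_true (has3 m) with h | h
    · rw [h]
      apply (PySem.Str.isIn_iff_infix _ _).mpr
      have hs3 : ("3" : String).toList = ['3'] := rfl
      rw [hs3, PySem.Int.toList_toStr]
      unfold PySem.Int.toChars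
      rw [if_neg (not_lt.mpr (Int.natCast_nonneg _)), Int.toNat_natCast]
      exact (pv_singleton_infix_iff_mem _ _).mpr ((mem3_toDigits m).mpr h)
    · rw [h, Bool.eq_false_iff]
      intro hi
      have hinf := (PySem.Str.isIn_iff_infix _ _).mp hi
      have hs3 : ("3" : String).toList = ['3'] := rfl
      rw [hs3] at hinf
      have h3' := (pv_singleton_infix_iff_mem _ _).mp hinf
      rw [PySem.Int.toList_toStr] at h3'
      unfold PySem.Int.toChars at h3'
      rw [if_neg (not_lt.mpr (Int.natCast_nonneg _)), Int.toNat_natCast] at h3'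
      rw [mem3_toDigits] at h3'
      rw [h3'] at h
      exact absurd h (by simp)
  rw [hmod, hIn]
  have hbeq : ((((m % 3 : Nat) : Int)) == 0) = (m % 3 == 0) := by
    by_cases h : m % 3 = 0
    · simp [h]
    · simp [h]; omega
  rw [hbeq]
  simp [Bool.not_and, Bool.not_not]

lemma find_shift (m : Nat) (h : goodB m = false) :
    Nat.find (exFrom m) = Nat.find (exFrom (m + 1)) + 1 := by
  have h0 : Nat.find (exFrom m) ≠ 0 := by
    intro h0
    have := Nat.find_spec (exFrom m)
    rw [h0] at this
    simp only [Nat.add_zero] at this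
    rw [this] at h
    exact absurd h (by simp)
  have hle : Nat.find (exFrom (m + 1)) ≤ Nat.find (exFrom m) - 1 := by
    apply Nat.find_le
    have := Nat.find_spec (exFrom m)
    have heq : m + 1 + (Nat.find (exFrom m) - 1) = m + Nat.find (exFrom m) := by omega
    rw [heq]
    exact this
  have hge : Nat.find (exFrom m) ≤ Nat.find (exFrom (m + 1)) + 1 := by
    apply Nat.find_le
    have := Nat.find_spec (exFrom (m + 1))
    have heq : m + (Nat.find (exFrom (m + 1)) + 1) = m + 1 + Nat.find (exFrom (m + 1)) := by omega
    rw [heq]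
    exact this
  omega

lemma skipA_from_aux : ∀ (K m : Nat), Nat.find (exFrom m) ≤ K →
    skipA ((m : Nat) : Int) = ((m + Nat.find (exFrom m) : Nat) : Int) := by
  intro K
  induction K with
  | zero =>
    intro m hK
    have hf : Nat.find (exFrom m) = 0 := by omega
    have hg : goodB m = true := by
      have := Nat.find_spec (exFrom m)
      rw [hf] at this
      simpa using this
    rw [skipA, dif_neg (by rw [badA_cast, hg]; simp), hf]
    simp
  | succ K ih =>
    intro m hK
    rcases Bool.eq_false_or_eq_true (goodB m) with hg | hg
    · rw [skipA, dif_neg (by rw [badA_cast, hg]; simp)]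
      have hf : Nat.find (exFrom m) = 0 := by
        rw [Nat.find_eq_zero]
        simpa using hg
      rw [hf]; simp
    · rw [skipA, dif_pos (by rw [badA_cast, hg]; simp)]
      have hshift := find_shift m hg
      have hK' : Nat.find (exFrom (m + 1)) ≤ K := by omega
      have := ih (m + 1) hK'
      have hcast : ((m : Nat) : Int) + 1 = (((m + 1 : Nat)) : Int) := by push_cast; ring
      rw [hcast, this, hshift]
      push_cast; ring

lemma skipA_nextV (a : Nat) : skipA (((a : Nat) : Int) + 1) = ((nextV a : Nat) : Int) := by
  have hcast : ((a : Nat) : Int) + 1 = (((a + 1 : Nat)) : Int) := by push_cast; ring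
  rw [hcast, skipA_from_aux (Nat.find (exFrom (a + 1))) (a + 1) le_rfl]
  unfold nextV
  push_cast; ring

def iterV : Nat → Nat → Nat
  | 0, m => m
  | N + 1, m => iterV N (nextV m)

lemma loopA_cast : ∀ (N m : Nat), loopA ((N : Nat) : Int) ((m : Nat) : Int) = ((iterV N m : Nat) : Int) := by
  intro N
  induction N with
  | zero => intro m; rw [loopA]; simp [iterV]
  | succ N ih =>
    intro m
    rw [loopA, if_neg (by push_cast; omega)]
    have h1 : ((((N + 1 : Nat)) : Int) - 1) = ((N : Nat) : Int) := by push_cast; ring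
    rw [h1, skipA_nextV m, ih (nextV m)]
    rfl

lemma iterV_swap : ∀ (N m : Nat), iterV (N + 1) m = nextV (iterV N m) := by
  intro N
  induction N with
  | zero => intro m; rfl
  | succ N ih =>
    intro m
    show iterV (N + 1) (nextV m) = nextV (iterV (N + 1) m)
    rw [ih (nextV m)]
    rfl

lemma iterV_nthV : ∀ N : Nat, iterV N 0 = nthV N := by
  intro N
  induction N with
  | zero => rfl
  | succ N ih => rw [iterV_swap, ih]; rfl

lemma solution_cast (N : Nat) : solution ((N : Nat) : Int) = ((nthV N : Nat) : Int) := by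
  unfold solution
  have h0 : ((0 : Int)) = ((0 : Nat) : Int) := rfl
  rw [h0, loopA_cast N 0, iterV_nthV]

def fd (d : Nat) : Nat := if d < 3 then d else d + 1

-- the a-th 3-free number: a in base 9, digits remapped by fd
def map9 (a : Nat) : Nat :=
  if a = 0 then 0 else 10 * map9 (a / 9) + fd (a % 9)
termination_by a
decreasing_by omega

lemma map9_eq (a : Nat) : map9 a = 10 * map9 (a / 9) + fd (a % 9) := by
  by_cases h : a = 0
  · subst h; rw [map9]; simp [fd]
  · rw [map9, if_neg h]

lemma fd_facts : ∀ d, d < 9 → fd d ≠ 3 ∧ fd d ≤ 9 := by decide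

lemma fd_step : ∀ d, d < 8 → fd d < fd (d + 1) ∧ ∀ e, e < 10 → fd d < e → e < fd (d + 1) → e = 3 := by decide

lemma has3_ten (q e : Nat) (he : e < 10) : has3 (10 * q + e) = ((e == 3) || has3 q) := by
  by_cases h : 10 * q + e = 0
  · have hq : q = 0 := by omega
    have hee : e = 0 := by omega
    subst hq; subst hee
    simp [has3]
  · rw [has3, if_neg h]
    have h1 : (10 * q + e) % 10 = e := by omega
    have h2 : (10 * q + e) / 10 = q := by omega
    rw [h1, h2]

lemma map9_no3 : ∀ a : Nat, has3 (map9 a) = false := by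
  intro a
  induction a using Nat.strong_induction_on with
  | _ a ih =>
    by_cases h : a = 0
    · subst h; rw [map9]; simp [has3]
    · rw [map9_eq]
      obtain ⟨hne3, hle9⟩ := fd_facts (a % 9) (by omega)
      rw [has3_ten _ _ (by omega)]
      have hdiv : a / 9 < a := by omega
      rw [ih (a / 9) hdiv]
      simp [hne3]

lemma map9_succ : ∀ a : Nat, map9 a < map9 (a + 1) ∧
    ∀ j, map9 a < j → j < map9 (a + 1) → has3 j = true := by
  intro a
  induction a using Nat.strong_induction_on with
  | _ a ih =>
    by_cases h8 : a % 9 = 8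
    · -- carry case: a + 1 = 9 * (a/9 + 1)
      have ha : 1 ≤ a := by omega
      have hd : (a + 1) / 9 = a / 9 + 1 := by omega
      have hm : (a + 1) % 9 = 0 := by omega
      have hdiv : a / 9 < a := by omega
      obtain ⟨ihlt, ihgap⟩ := ih (a / 9) hdiv
      have e1 : map9 a = 10 * map9 (a / 9) + 9 := by
        rw [map9_eq, h8]; rfl
      have e2 : map9 (a + 1) = 10 * map9 (a / 9 + 1) := by
        rw [map9_eq, hd, hm]; simp [fd]
      constructor
      · omega
      · intro j hj1 hj2
        rw [e1] at hj1; rw [e2] at hj2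
        have hj10 : map9 (a / 9) < j / 10 := by omega
        have hj10' : j / 10 < map9 (a / 9 + 1) := by omega
        have := ihgap (j / 10) hj10 hj10'
        have hj : j = 10 * (j / 10) + j % 10 := by omega
        rw [hj, has3_ten _ _ (by omega), this]
        simp
    · -- no carry: a + 1 changes only the last base-9 digit
      have hd : (a + 1) / 9 = a / 9 := by omega
      have hm : (a + 1) % 9 = a % 9 + 1 := by omega
      obtain ⟨hstep, hgap⟩ := fd_step (a % 9) (by omega)
      have e1 : map9 a = 10 * map9 (a / 9) + fd (a % 9) := map9_eq a
      have e2 : map9 (a + 1) = 10 * map9 (a / 9) + fd (a % 9 + 1) := by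
        rw [map9_eq, hd, hm]
      constructor
      · omega
      · intro j hj1 hj2
        rw [e1] at hj1; rw [e2] at hj2
        obtain ⟨h3, hle⟩ := fd_facts (a % 9 + 1) (by omega)
        have hj : j = 10 * map9 (a / 9) + (j - 10 * map9 (a / 9)) := by omega
        have he : j - 10 * map9 (a / 9) = 3 := by
          apply hgap <;> omega
        rw [hj, he, has3_ten _ _ (by omega)]
        simp

-- the 6 valid last digits of a decade whose 3-free prefix has residue r mod 3
def dig (r b : Nat) : Nat :=
  ((if r = 0 then [1, 2, 4, 5, 7, 8] else if r = 1 then [0, 1, 4, 6, 7, 9]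
    else [0, 2, 5, 6, 8, 9]) : List Nat).getD b 0

lemma dig_facts : ∀ r < 3, ∀ b < 6, dig r b ≤ 9 ∧ dig r b ≠ 3 ∧ (r + dig r b) % 3 ≠ 0 := by decide

lemma dig_gap : ∀ r < 3, ∀ b < 5, ∀ e < 10,
    e ≤ dig r b ∨ dig r (b + 1) ≤ e ∨ e = 3 ∨ (r + e) % 3 = 0 := by decide

lemma dig_first : ∀ r < 3, ∀ e < 10, dig r 0 ≤ e ∨ e = 3 ∨ (r + e) % 3 = 0 := by decide

lemma dig_last : ∀ r < 3, ∀ e < 10, e ≤ dig r 5 ∨ e = 3 ∨ (r + e) % 3 = 0 := by decide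

lemma dig_mono : ∀ r < 3, ∀ b < 5, dig r b < dig r (b + 1) := by decide

lemma goodB_ten (q e : Nat) (he : e < 10) (hq : has3 q = false) (hne : e ≠ 3)
    (hmod : (q % 3 + e) % 3 ≠ 0) : goodB (10 * q + e) = true := by
  unfold goodB
  have h3 : (10 * q + e) % 3 ≠ 0 := by omega
  rw [has3_ten _ _ he, hq]
  simp [h3, hne]

lemma bad_ten (q e : Nat) (he : e < 10) (h : e = 3 ∨ (q % 3 + e) % 3 = 0) :
    goodB (10 * q + e) = false := by
  unfold goodB
  rcases h with h | h
  · rw [has3_ten _ _ he, h]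
    simp
  · have h3 : (10 * q + e) % 3 = 0 := by omega
    simp [h3]

lemma bad_has3 (j : Nat) (h : has3 j = true) : goodB j = false := by
  unfold goodB; rw [h]; simp

-- closed form for the n-th good number
def Fv (n : Nat) : Nat :=
  if n = 0 then 0 else 10 * map9 ((n - 1) / 6) + dig (map9 ((n - 1) / 6) % 3) ((n - 1) % 6)

lemma Fv_succ : ∀ n : Nat, Fv (n + 1) = nextV (Fv n) := by
  intro n
  cases n with
  | zero =>
    have h1 : Fv 1 = 1 := by
      unfold Fv
      rw [if_neg (by omega)]
      norm_num
      rw [map9]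
      simp [dig]
    have h0 : Fv 0 = 0 := by unfold Fv; simp
    rw [h0, h1]
    symm
    apply nextV_eq 0 1 (by omega)
    · simp [goodB, has3]
    · intro j h1 h2; omega
  | succ m =>
    set a := m / 6 with ha
    set b := m % 6 with hb
    set q := map9 a with hq
    set r := q % 3 with hr
    have hr3 : r < 3 := by omega
    have hq3 : has3 q = false := map9_no3 a
    have e1 : Fv (m + 1) = 10 * q + dig r b := by
      unfold Fv; rw [if_neg (by omega)]
      rw [show m + 1 - 1 = m from rfl, ← ha, ← hb, ← hq, ← hr]
    by_cases hb5 : b < 5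
    · -- stays in the same decade
      have e2 : Fv (m + 2) = 10 * q + dig r (b + 1) := by
        unfold Fv; rw [if_neg (by omega)]
        have h1 : (m + 1) / 6 = a := by omega
        have h2 : (m + 1) % 6 = b + 1 := by omega
        rw [show m + 2 - 1 = m + 1 by omega, h1, h2, ← hq, ← hr]
      rw [e1, e2]
      symm
      obtain ⟨hle9, hne3, hmod⟩ := dig_facts r hr3 (b + 1) (by omega)
      apply nextV_eq
      · have := dig_mono r hr3 b hb5
        omega
      · exact goodB_ten q _ (by omega) hq3 hne3 hmod
      · intro j hj1 hj2
        have hje : j = 10 * q + (j - 10 * q) := by omega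
        have hcase := dig_gap r hr3 b hb5 (j - 10 * q) (by omega)
        rw [hje]
        exact bad_ten q _ (by omega) (by omega)
    · -- crosses to the next 3-free decade
      have hb' : b = 5 := by omega
      set q' := map9 (a + 1) with hq'
      set r' := q' % 3 with hr'
      have hr3' : r' < 3 := by omega
      have hq3' : has3 q' = false := map9_no3 (a + 1)
      obtain ⟨hlt, hgap⟩ := map9_succ a
      have e2 : Fv (m + 2) = 10 * q' + dig r' 0 := by
        unfold Fv; rw [if_neg (by omega)]
        have h1 : (m + 1) / 6 = a + 1 := by omega
        have h2 : (m + 1) % 6 = 0 := by omega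
        rw [show m + 2 - 1 = m + 1 by omega, h1, h2, ← hq', ← hr']
      rw [e1, e2, hb']
      symm
      obtain ⟨hle9, hne3, hmod⟩ := dig_facts r' hr3' 0 (by omega)
      obtain ⟨hle9', hne3', hmod'⟩ := dig_facts r hr3 5 (by omega)
      apply nextV_eq
      · omega
      · exact goodB_ten q' _ (by omega) hq3' hne3 hmod
      · intro j hj1 hj2
        have hje : j = 10 * (j / 10) + j % 10 := by omega
        rcases Nat.lt_trichotomy (j / 10) q' with hc | hc | hc
        · rcases Nat.lt_or_ge (j / 10) (q + 1) with hcq | hcq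
          · -- same decade as Fv (m+1): digit above dig r 5
            have hcq' : j / 10 = q := by omega
            have hcase := dig_last r hr3 (j % 10) (by omega)
            rw [hje, hcq']
            exact bad_ten q _ (by omega) (by omega)
          · -- strictly between the 3-free prefixes: prefix has a digit 3
            have := hgap (j / 10) (by omega) hc
            rw [hje]
            exact bad_has3 _ (by rw [has3_ten _ _ (by omega), this]; simp)
        · -- decade of Fv (m+2): digit below dig r' 0
          have hcase := dig_first r' hr3' (j % 10) (by omega)
          rw [hje, hc]
          exact bad_ten q' _ (by omega) (by omega)
        · omega

lemma nthV_Fv : ∀ N : Nat, nthV N = Fv N := by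
  intro N
  induction N with
  | zero => unfold Fv; rfl
  | succ N ih => show nextV (nthV N) = Fv (N + 1); rw [ih, ← Fv_succ]

lemma bloopB_cast : ∀ (a : Nat) (q w : Int),
    bloopB ((a : Nat) : Int) q w = q + w * ((map9 a : Nat) : Int) := by
  intro a
  induction a using Nat.strong_induction_on with
  | _ a ih =>
    intro q w
    by_cases h : a = 0
    · subst h
      rw [bloopB, if_pos (by simp), map9]
      simp
    · rw [bloopB, if_neg (by simp; omega)]
      have hdiv : PySem.Int.floordiv ((a : Nat) : Int) 9 = (((a / 9 : Nat)) : Int) := by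
        exact_mod_cast PySem.Int.floordiv_natCast a 9
      have hmod : PySem.Int.mod ((a : Nat) : Int) 9 = (((a % 9 : Nat)) : Int) := by
        exact_mod_cast PySem.Int.mod_natCast a 9
      rw [hdiv, hmod, ih (a / 9) (by omega)]
      have hfd : (if (((a % 9 : Nat)) : Int) < 3 then (((a % 9 : Nat)) : Int)
          else (((a % 9 : Nat)) : Int) + 1) = ((fd (a % 9) : Nat) : Int) := by
        unfold fd
        by_cases h3 : a % 9 < 3
        · rw [if_pos (by exact_mod_cast h3), if_pos h3]
        · rw [if_neg (by exact_mod_cast h3), if_neg h3]; push_cast; ring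
      rw [hfd, map9_eq a]
      push_cast; ring

lemma solution_alt_cast (N : Nat) : solution_alt ((N : Nat) : Int) = ((Fv N : Nat) : Int) := by
  by_cases h0 : N = 0
  · subst h0; unfold solution_alt Fv; simp
  · unfold solution_alt
    rw [if_neg (by simp; omega)]
    have hN1 : ((N : Nat) : Int) - 1 = (((N - 1 : Nat)) : Int) := by omega
    rw [hN1]
    have hdiv : PySem.Int.floordiv (((N - 1 : Nat)) : Int) 6 = ((((N - 1) / 6 : Nat)) : Int) := by
      exact_mod_cast PySem.Int.floordiv_natCast (N - 1) 6
    have hmod : PySem.Int.mod (((N - 1 : Nat)) : Int) 6 = ((((N - 1) % 6 : Nat)) : Int) := by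
      exact_mod_cast PySem.Int.mod_natCast (N - 1) 6
    rw [hdiv, hmod]
    dsimp only
    have hq : bloopB ((((N - 1) / 6 : Nat)) : Int) 0 1 = ((map9 ((N - 1) / 6) : Nat) : Int) := by
      rw [bloopB_cast]; ring
    rw [hq]
    have hr : PySem.Int.mod ((map9 ((N - 1) / 6) : Nat) : Int) 3
        = (((map9 ((N - 1) / 6) % 3 : Nat)) : Int) := by
      exact_mod_cast PySem.Int.mod_natCast _ 3
    rw [hr]
    unfold Fv
    rw [if_neg h0]
    set A := (N - 1) / 6 with hA
    set B := (N - 1) % 6 with hB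
    have hB6 : B < 6 := by omega
    have hR3 : map9 A % 3 < 3 := by omega
    rcases (by omega : map9 A % 3 = 0 ∨ map9 A % 3 = 1 ∨ map9 A % 3 = 2) with hR | hR | hR <;>
      rw [hR] <;> interval_cases B <;>
      simp [dig, PySem.List.pyGet?, PySem.List.pyIdx?]

-- ===== VERDICT (by name: the statement is the Claim_ definition above) =====
theorem solution_spec : Claim_equal_solution := by
  unfold Claim_equal_solution
  intro n _ hpre
  unfold Pre_solution at hpre
  unfold Spec_solution
  have h : n = ((n.toNat : Nat) : Int) := by omega
  rw [h, solution_cast, solution_alt_cast, nthV_Fv]
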